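-- pv_equiv track=rewrite | github.com/FoodLoverForYouAndYourFood/FoodForAlgorithms | clop2(HW2).py | MAXgEN
-- ===== SOURCE A (Python) =====
-- def MAXgEN(n):
--     nums = [0] * (n + 1)
--     nums[1] = 1
--     for i in range(1, len(nums)):
--         if 2 <= 2 * i <= n:
--             nums[2 * i] = nums[i]
--         if 2 <= 2 * i + 1 <= n:
--             nums[2 * i + 1] = nums[i] + nums[i + 1]
--     return max(nums)
-- ===== SOURCE B (Python) =====
-- def MAXgEN(n):
--     # Stern's diatomic sequence: each value computed independently from the
--     # binary expansion of its index with the (a, b) pair iteration; no DP array.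
--     def fusc(k):
--         a, b = 1, 0
--         while k:
--             if k & 1:
--                 b += a
--             else:
--                 a += b
--             k >>= 1
--         return b
--     return max(fusc(k) for k in range(n + 1))
-- ===== Notes on version B (the rewrite author's own statement) =====
-- stated objective: alternative
-- what changed: B drops the shared DP array entirely: each entry is Stern's diatomic sequence, so B computes every value independently from the binary expansion of its index with the classic fusc (a,b)-pair iteration and takes the max of a generator.
import Mathlib
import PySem

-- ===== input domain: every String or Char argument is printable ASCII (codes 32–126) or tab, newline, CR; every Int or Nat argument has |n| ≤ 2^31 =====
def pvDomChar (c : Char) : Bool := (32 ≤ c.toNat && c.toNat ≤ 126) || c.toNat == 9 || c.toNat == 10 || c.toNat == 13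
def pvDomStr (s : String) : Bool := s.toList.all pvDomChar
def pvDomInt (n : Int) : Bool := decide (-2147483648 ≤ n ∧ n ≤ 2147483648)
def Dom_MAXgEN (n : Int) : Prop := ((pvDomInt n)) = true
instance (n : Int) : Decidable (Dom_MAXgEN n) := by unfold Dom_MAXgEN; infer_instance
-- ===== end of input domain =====

-- B drops A's shared DP array: the entries are Stern's diatomic sequence, so B computes
-- every value independently by the fusc (a,b)-pair iteration over the bits of its index
-- and takes the max; objective: alternative (different algorithm, same values).

-- ===== PORT A =====
-- loop body of A: the two guarded writes of iteration i (second read sees the first write)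
def stepA (n : Int) (a : Array Int) (i : Int) : Array Int :=
  let a := if 2 ≤ 2 * i ∧ 2 * i ≤ n then
      a.setIfInBounds (2 * i).toNat (a.getD i.toNat 0) else a
  if 2 ≤ 2 * i + 1 ∧ 2 * i + 1 ≤ n then
      a.setIfInBounds (2 * i + 1).toNat (a.getD i.toNat 0 + a.getD (i + 1).toNat 0) else a

def MAXgEN (n : Int) : Int :=
  let nums : Array Int := (Array.replicate (n + 1).toNat 0).setIfInBounds 1 1
  let nums := (PySem.List.pyRange 1 (nums.size : Int) 1).foldl (stepA n) nums
  (PySem.List.max? nums.toList (fun x => x)).getD 0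

-- ===== PORT B =====
-- the `while k:` bit loop of B's fusc, on k.toNat (B only calls fusc on k ≥ 0,
-- the elements of range(n+1), where toNat is exact)
def fuscGo (a b : Int) : Nat → Int
  | 0 => b
  | (k + 1) =>
      if (k + 1) % 2 = 1 then fuscGo a (b + a) ((k + 1) / 2)
      else fuscGo (a + b) b ((k + 1) / 2)
decreasing_by all_goals omega

def fusc (k : Int) : Int := fuscGo 1 0 k.toNat

def MAXgEN_alt (n : Int) : Int :=
  (PySem.List.max? ((PySem.List.pyRange 0 (n + 1) 1).map fusc) (fun x => x)).getD 0

-- ===== PRECONDITION & SPEC =====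
-- Pre_ excludes n ≤ 0, where `nums[1] = 1` in A raises IndexError ([0]*(n+1) has length ≤ 1).
def Pre_MAXgEN (n : Int) : Prop := 1 ≤ n
instance (n : Int) : Decidable (Pre_MAXgEN n) := by unfold Pre_MAXgEN; infer_instance
def pvWitness_MAXgEN : Int := 7

def Spec_MAXgEN (n : Int) (out : Int) : Prop := out = MAXgEN_alt n
instance (n : Int) (out : Int) : Decidable (Spec_MAXgEN n out) := by unfold Spec_MAXgEN; infer_instance

-- ===== CLAIM (what is proved, stated in full; the proofs are below) =====
def Claim_equal_MAXgEN : Prop := ∀ (n : Int), Dom_MAXgEN n → Pre_MAXgEN n → Spec_MAXgEN n (MAXgEN n)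

-- ===== LEMMAS AND PROOFS =====

-- proof-side List mirror of A's array loop body
def stepAL (n : Int) (a : List Int) (i : Int) : List Int :=
  let a := if 2 ≤ 2 * i ∧ 2 * i ≤ n then
      a.set (2 * i).toNat (a.getD i.toNat 0) else a
  if 2 ≤ 2 * i + 1 ∧ 2 * i + 1 ≤ n then
      a.set (2 * i + 1).toNat (a.getD i.toNat 0 + a.getD (i + 1).toNat 0) else a

-- Array.getD through toList
lemma getD_toList (a : Array Int) (i : Nat) (v : Int) : a.getD i v = a.toList.getD i v := by
  simp only [Array.getD, List.getD]
  split
  · next h => simp [List.getElem?_eq_getElem (by simpa using h)]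
  · next h => simp [List.getElem?_eq_none_iff.2 (by simpa using Nat.le_of_not_lt h)]

lemma stepA_toList (n : Int) (a : Array Int) (i : Int) :
    (stepA n a i).toList = stepAL n a.toList i := by
  unfold stepA stepAL
  by_cases h1 : 2 ≤ 2 * i ∧ 2 * i ≤ n <;> by_cases h2 : 2 ≤ 2 * i + 1 ∧ 2 * i + 1 ≤ n
  · simp only [if_pos h1, if_pos h2, Array.toList_setIfInBounds, getD_toList]
  · simp only [if_pos h1, if_neg h2, Array.toList_setIfInBounds, getD_toList]
  · simp only [if_neg h1, if_pos h2, Array.toList_setIfInBounds, getD_toList]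
  · simp only [if_neg h1, if_neg h2, getD_toList]

lemma foldl_toList (f : Array Int → Int → Array Int) (g : List Int → Int → List Int)
    (h : ∀ a i, (f a i).toList = g a.toList i) :
    ∀ (l : List Int) (init : Array Int), (l.foldl f init).toList = l.foldl g init.toList := by
  intro l
  induction l with
  | nil => intro init; rfl
  | cons x xs ih => intro init; simp only [List.foldl_cons, ih, h]

-- the value A's loop puts at index k of nums (k ≥ 2: pull from the halved indices)
def sval : Nat → Int
  | 0 => 0
  | 1 => 1
  | (k + 2) =>
      if (k + 2) % 2 = 0 then sval ((k + 2) / 2)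
      else sval ((k + 2) / 2) + sval ((k + 2) / 2 + 1)
decreasing_by all_goals omega

lemma sval_eq (k : Nat) (hk : 2 ≤ k) :
    sval k = if k % 2 = 0 then sval (k / 2) else sval (k / 2) + sval (k / 2 + 1) := by
  obtain ⟨m, rfl⟩ : ∃ m, k = m + 2 := ⟨k - 2, by omega⟩
  rw [sval]

-- the fusc pair-iteration invariant: fuscGo a b k = a·sval k + b·sval (k+1)
lemma fuscGo_eq (k : Nat) : ∀ a b : Int, fuscGo a b k = a * sval k + b * sval (k + 1) := by
  induction k using Nat.strong_induction_on with
  | _ k ih =>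
    intro a b
    match k with
    | 0 => simp [fuscGo, sval]
    | (m + 1) =>
      rw [fuscGo]
      by_cases hpar : (m + 1) % 2 = 1
      · rw [if_pos hpar, ih ((m + 1) / 2) (by omega)]
        rw [sval_eq (m + 1 + 1) (by omega)]
        rcases Nat.lt_or_ge m 1 with hm | hm
        · interval_cases m
          simp [sval]; ring
        · rw [sval_eq (m + 1) (by omega), if_neg (by omega),
            if_pos (show (m + 1 + 1) % 2 = 0 by omega),
            show (m + 1 + 1) / 2 = (m + 1) / 2 + 1 by omega]
          ring
      · rw [if_neg hpar, ih ((m + 1) / 2) (by omega)]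
        rw [sval_eq (m + 1) (by omega), if_pos (by omega),
          sval_eq (m + 1 + 1) (by omega), if_neg (by omega),
          show (m + 1 + 1) / 2 = (m + 1) / 2 by omega]
        ring

lemma fusc_natCast (j : Nat) : fusc (j : Int) = sval j := by
  unfold fusc
  rw [Int.toNat_natCast, fuscGo_eq]
  ring

-- the initial array [0]*(n'+1) with nums[1] = 1, as a map over range
lemma init_eq (n' : Nat) :
    (List.replicate (n' + 1) (0 : Int)).set 1 1
      = (List.range (n' + 1)).map (fun j => if j ≤ 1 then sval j else 0) := by
  apply List.ext_getElem
  · simp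
  · intro j h1 h2
    simp only [List.getElem_set, List.getElem_replicate, List.getElem_map, List.getElem_range] at *
    rcases Nat.lt_or_ge j 2 with hj | hj
    · interval_cases j <;> simp [sval]
    · simp [show ¬ (1 = j) by omega, show ¬ (j ≤ 1) by omega]

-- writing sval (c+1) at index c+1 moves the filled threshold from c to c+1
lemma set_succ_thresh (n' c : Nat) :
    ((List.range (n' + 1)).map (fun j => if j ≤ c then sval j else 0)).set (c + 1) (sval (c + 1))
      = (List.range (n' + 1)).map (fun j => if j ≤ c + 1 then sval j else 0) := by
  apply List.ext_getElem
  · simp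
  · intro j hj1 hj2
    simp only [List.getElem_set, List.getElem_map, List.getElem_range] at *
    rcases eq_or_ne (c + 1) j with h | h
    · subst h; simp
    · simp only [if_neg h]
      by_cases hjc : j ≤ c
      · simp [hjc, show j ≤ c + 1 by omega]
      · simp [hjc, show ¬ j ≤ c + 1 by omega]

-- two equal thresholds beyond the array length fill the same array
lemma thresh_congr (n' c c' : Nat) (h : ∀ j, j ≤ n' → (j ≤ c ↔ j ≤ c')) :
    ((List.range (n' + 1)).map (fun j => if j ≤ c then sval j else 0))
      = (List.range (n' + 1)).map (fun j => if j ≤ c' then sval j else 0) := by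
  apply List.map_congr_left
  intro j hj
  rw [List.mem_range] at hj
  by_cases hc : j ≤ c
  · simp [hc, (h j (by omega)).1 hc]
  · have hc2 : ¬ j ≤ c' := fun hc' => hc ((h j (by omega)).2 hc')
    simp [hc, hc2]

-- A's loop invariant: after processing i = 1..t the array holds sval j for j ≤ 2t+1, 0 beyond
lemma foldA (n' t : Nat) (h1 : 1 ≤ n') (h2 : t ≤ n') :
    (PySem.List.pyRange 1 ((t : Int) + 1) 1).foldl (stepAL (n' : Int))
        ((List.replicate (n' + 1) (0 : Int)).set 1 1)
      = (List.range (n' + 1)).map (fun j => if j ≤ 2 * t + 1 then sval j else 0) := by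
  induction t with
  | zero =>
    rw [show ((0 : Nat) : Int) + 1 = 1 by norm_num, PySem.List.pyRange_one_eq_nil (by norm_num),
      List.foldl_nil, init_eq n']
  | succ t ih =>
    have hsplit : PySem.List.pyRange 1 (((t + 1 : Nat) : Int) + 1) 1
        = PySem.List.pyRange 1 ((t : Int) + 1) 1 ++ [((t : Int) + 1)] := by
      push_cast
      exact PySem.List.pyRange_one_succ_right (by exact_mod_cast by omega)
    rw [hsplit, List.foldl_append, List.foldl_cons, List.foldl_nil, ih (by omega)]
    have hc1 : (2 : Int) * ((t : Int) + 1) = ((2 * (t + 1) : Nat) : Int) := by push_cast; ring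
    have hc2 : ((2 * (t + 1) : Nat) : Int) + 1 = ((2 * (t + 1) + 1 : Nat) : Int) := by
      push_cast; ring
    have hc3 : ((t : Int) + 1) = ((t + 1 : Nat) : Int) := by push_cast; ring
    have hc4 : ((t + 1 : Nat) : Int) + 1 = ((t + 2 : Nat) : Int) := by push_cast; ring
    unfold stepAL
    rw [hc1, hc2, hc3, hc4]
    simp only [Int.toNat_natCast]
    have hget : ∀ c k : Nat, k ≤ c →
        ((List.range (n' + 1)).map (fun j => if j ≤ c then sval j else 0)).getD k 0
          = if k ≤ n' then sval k else 0 := by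
      intro c k hk
      by_cases hkn : k ≤ n'
      · rw [PySem.List.getD_map_range _ _ _ _ (by omega)]
        simp [hk, hkn]
      · rw [List.getD_eq_default]
        · simp [hkn]
        · simp; omega
    by_cases hw1 : 2 * (t + 1) ≤ n'
    · have hC1 : (2 : Int) ≤ ((2 * (t + 1) : Nat) : Int) ∧ ((2 * (t + 1) : Nat) : Int) ≤ (n' : Int) :=
        ⟨by exact_mod_cast by omega, by exact_mod_cast hw1⟩
      rw [if_pos hC1]
      rw [hget (2 * t + 1) (t + 1) (by omega), if_pos (show t + 1 ≤ n' by omega)]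
      rw [show sval (t + 1) = sval (2 * (t + 1)) by
        rw [sval_eq (2 * (t + 1)) (by omega)]
        simp [show (2 * (t + 1)) % 2 = 0 by omega, show 2 * (t + 1) / 2 = t + 1 by omega]]
      have hset1 := set_succ_thresh n' (2 * t + 1)
      rw [show 2 * t + 1 + 1 = 2 * (t + 1) by omega] at hset1
      rw [hset1]
      by_cases hw2 : 2 * (t + 1) + 1 ≤ n'
      · have hC2 : (2 : Int) ≤ ((2 * (t + 1) + 1 : Nat) : Int)
            ∧ ((2 * (t + 1) + 1 : Nat) : Int) ≤ (n' : Int) :=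
          ⟨by exact_mod_cast by omega, by exact_mod_cast hw2⟩
        rw [if_pos hC2]
        rw [hget (2 * (t + 1)) (t + 1) (by omega), hget (2 * (t + 1)) (t + 2) (by omega)]
        rw [if_pos (show t + 1 ≤ n' by omega), if_pos (show t + 2 ≤ n' by omega)]
        rw [show sval (t + 1) + sval (t + 2) = sval (2 * (t + 1) + 1) by
          rw [sval_eq (2 * (t + 1) + 1) (by omega)]
          simp [show (2 * (t + 1) + 1) % 2 = 1 by omega,
            show (2 * (t + 1) + 1) / 2 = t + 1 by omega]]
        rw [set_succ_thresh n' (2 * (t + 1))]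
      · have hNC2 : ¬ ((2 : Int) ≤ ((2 * (t + 1) + 1 : Nat) : Int)
            ∧ ((2 * (t + 1) + 1 : Nat) : Int) ≤ (n' : Int)) :=
          fun hcon => hw2 (by exact_mod_cast hcon.2)
        rw [if_neg hNC2]
        exact thresh_congr n' _ _ (by intro j hj; omega)
    · have hNC1 : ¬ ((2 : Int) ≤ ((2 * (t + 1) : Nat) : Int)
          ∧ ((2 * (t + 1) : Nat) : Int) ≤ (n' : Int)) :=
        fun hcon => hw1 (by exact_mod_cast hcon.2)
      have hNC2 : ¬ ((2 : Int) ≤ ((2 * (t + 1) + 1 : Nat) : Int)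
          ∧ ((2 * (t + 1) + 1 : Nat) : Int) ≤ (n' : Int)) :=
        fun hcon => hw1 (by
          have : 2 * (t + 1) + 1 ≤ n' := by exact_mod_cast hcon.2
          omega)
      rw [if_neg hNC1, if_neg hNC2]
      exact thresh_congr n' _ _ (by intro j hj; omega)

-- B's list of fusc values over range(n'+1) is the same sval list
lemma altList (n' : Nat) :
    (PySem.List.pyRange 0 ((n' : Int) + 1) 1).map fusc
      = (List.range (n' + 1)).map sval := by
  rw [PySem.List.pyRange_one, List.map_map,
    show (((n' : Int) + 1) - 0).toNat = n' + 1 by omega]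
  apply List.map_congr_left
  intro j _
  show fusc (0 + (j : Int)) = sval j
  rw [zero_add, fusc_natCast]

-- ===== VERDICT (by name: the statement is the Claim_ definition above) =====
theorem MAXgEN_spec : Claim_equal_MAXgEN := by
  intro n _ hpre
  have hpre' : (1 : Int) ≤ n := hpre
  lift n to Nat using (by omega) with n'
  have hn' : 1 ≤ n' := by exact_mod_cast hpre'
  simp only [Spec_MAXgEN, MAXgEN, MAXgEN_alt]
  have htn : ((n' : Int) + 1).toNat = n' + 1 := by omega
  rw [htn]
  have hsz : (((Array.replicate (n' + 1) (0 : Int)).setIfInBounds 1 1).size : Int)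
      = (n' : Int) + 1 := by simp
  rw [hsz]
  have hinit : ((Array.replicate (n' + 1) (0 : Int)).setIfInBounds 1 1).toList
      = (List.replicate (n' + 1) (0 : Int)).set 1 1 := by
    simp [Array.toList_setIfInBounds]
  rw [foldl_toList _ _ (stepA_toList (n' : Int)), hinit]
  rw [foldA n' n' hn' (le_refl n'), altList n']
  rw [thresh_congr n' (2 * n' + 1) n' (by intro j hj; omega)]
  rw [show (List.range (n' + 1)).map (fun j => if j ≤ n' then sval j else 0)
        = (List.range (n' + 1)).map sval from
      List.map_congr_left (fun j hj => by
        rw [List.mem_range] at hj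
        simp [show j ≤ n' by omega])]
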